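-- pv_equiv track=rewrite | github.com/j622amilah/ML_DL_modeling | Motor_classification/subfunctions/detect_jumps_in_index_vector_simple.py | detect_jumps_in_index_vector_simple
-- ===== SOURCE A (Python) =====
-- def detect_jumps_in_index_vector_simple(vec):
--
--     # Initialize outputs
--     break_st = [vec[0]]
--     break_end = []      # if empty the vector does not pass again through zero
--
--     if len(vec) > 1:
--         for i in range(len(vec)-1):
--             # Check for end
--             if i == len(vec)-1:
--                 break_end = break_end + [vec[i+1]]
--             elif vec[i] != vec[i+1]-1:
--                 # not consecutive data point
--                 break_end = break_end + [vec[i]]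
--                 break_st = break_st + [vec[i+1]]
--             # else:
--                 # Consecutive : continue searching (just for thinking)
--
--     return break_st, break_end
-- ===== SOURCE B (Python) =====
-- def detect_jumps_in_index_vector_simple(vec):
--     # Group the vector into maximal runs of consecutive integers, then read the
--     # answers off the runs: starts = first element of every run, ends = last
--     # element of every run except the final one (A never records the last end).
--     runs = [[vec[0]]]
--     for x in vec[1:]:
--         if x == runs[-1][-1] + 1:
--             runs[-1].append(x)
--         else:
--             runs.append([x])
--     return [r[0] for r in runs], [r[-1] for r in runs[:-1]]
-- ===== Notes on version B (the rewrite author's own statement) =====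
-- stated objective: faster
-- what changed: Replaces A's interleaved boundary-detecting loop (which grows two lists by repeated list concatenation and carries a dead i==len-1 branch) with a run-length grouping algorithm: the vector is first partitioned into maximal runs of consecutive integers, and the two outputs are then read off the runs list (first element of every run, last element of every run but the final one).
import Mathlib
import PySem

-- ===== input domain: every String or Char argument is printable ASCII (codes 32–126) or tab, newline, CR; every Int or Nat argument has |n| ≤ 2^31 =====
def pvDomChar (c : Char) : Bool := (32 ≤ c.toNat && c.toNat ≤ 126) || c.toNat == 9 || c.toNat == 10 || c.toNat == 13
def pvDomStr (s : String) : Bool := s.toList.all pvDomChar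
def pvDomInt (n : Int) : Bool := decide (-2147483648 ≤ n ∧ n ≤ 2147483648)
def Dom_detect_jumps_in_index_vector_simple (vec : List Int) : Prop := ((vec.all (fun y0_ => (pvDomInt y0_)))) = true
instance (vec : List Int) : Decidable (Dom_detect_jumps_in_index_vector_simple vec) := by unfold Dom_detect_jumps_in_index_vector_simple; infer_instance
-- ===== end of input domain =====

-- B replaces A's interleaved boundary-detecting loop by run-length grouping into maximal
-- consecutive runs; return values agree on all non-empty vectors (empty input raises in both).


-- ===== PORT A =====
def detect_jumps_in_index_vector_simple (vec : List Int) : List Int × List Int :=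
  let break_st : List Int := [PySem.List.pyGetD vec 0 0]
  let break_end : List Int := []
  if 1 < vec.length then
    (PySem.List.pyRange 0 ((vec.length : Int) - 1) 1).foldl
      (fun (s : List Int × List Int) i =>
        if i == (vec.length : Int) - 1 then
          (s.1, s.2 ++ [PySem.List.pyGetD vec (i + 1) 0])
        else if decide (PySem.List.pyGetD vec i 0 ≠ PySem.List.pyGetD vec (i + 1) 0 - 1) then
          (s.1 ++ [PySem.List.pyGetD vec (i + 1) 0], s.2 ++ [PySem.List.pyGetD vec i 0])
        else s)
      (break_st, break_end)
  else (break_st, break_end)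

-- ===== PORT B =====
-- models the in-place `runs[-1].append(x)` of Source B: append x to the last run
def pvAppendLast (runs : List (List Int)) (x : Int) : List (List Int) :=
  match runs with
  | [] => []
  | [r] => [r ++ [x]]
  | r :: rs => r :: pvAppendLast rs x

def detect_jumps_in_index_vector_simple_alt (vec : List Int) : List Int × List Int :=
  let runs : List (List Int) :=
    (PySem.List.slice vec (some 1) none).foldl
      (fun runs x =>
        if x == PySem.List.pyGetD (PySem.List.pyGetD runs (-1) []) (-1) 0 + 1 then
          pvAppendLast runs x
        else
          runs ++ [[x]])
      [[PySem.List.pyGetD vec 0 0]]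
  (runs.map (fun r => PySem.List.pyGetD r 0 0),
   (PySem.List.slice runs none (some (-1))).map (fun r => PySem.List.pyGetD r (-1) 0))

-- ===== PRECONDITION & SPEC =====
-- Indexing the first element (vec[0]) raises IndexError on the empty list in both programs.
def Pre_detect_jumps_in_index_vector_simple (vec : List Int) : Prop := vec ≠ []
instance (vec : List Int) : Decidable (Pre_detect_jumps_in_index_vector_simple vec) := by unfold Pre_detect_jumps_in_index_vector_simple; infer_instance
def pvWitness_detect_jumps_in_index_vector_simple : List Int := [3, 4, 7, 8]

def Spec_detect_jumps_in_index_vector_simple (vec : List Int) (out : List Int × List Int) : Prop := out = detect_jumps_in_index_vector_simple_alt vec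
instance (vec : List Int) (out : List Int × List Int) : Decidable (Spec_detect_jumps_in_index_vector_simple vec out) := by unfold Spec_detect_jumps_in_index_vector_simple; infer_instance

-- ===== CLAIM (what is proved, stated in full; the proofs are below) =====
def Claim_equal_detect_jumps_in_index_vector_simple : Prop := ∀ (vec : List Int), Dom_detect_jumps_in_index_vector_simple vec → Pre_detect_jumps_in_index_vector_simple vec → Spec_detect_jumps_in_index_vector_simple vec (detect_jumps_in_index_vector_simple vec)

-- ===== LEMMAS AND PROOFS =====

-- canonical "pair scan" both programs are reduced to: given the previous element and the
-- rest of the vector, the extra (starts, ends) contributed by the jumps, in input order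
def pvPairScan : Int → List Int → List Int × List Int
  | _, [] => ([], [])
  | v, x :: xs =>
    let p := pvPairScan x xs
    if v = x - 1 then p else (x :: p.1, v :: p.2)

-- A's filter/map view of the index range computes exactly the pair scan.
theorem pv_scan_of_filter : ∀ (vs : List Int) (v : Int),
    (((List.range vs.length).filter
        (fun k => decide ((v::vs).getD k 0 ≠ (v::vs).getD (k+1) 0 - 1))).map
        (fun k => (v::vs).getD (k+1) 0),
     ((List.range vs.length).filter
        (fun k => decide ((v::vs).getD k 0 ≠ (v::vs).getD (k+1) 0 - 1))).map
        (fun k => (v::vs).getD k 0))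
    = pvPairScan v vs := by
  intro vs
  induction vs with
  | nil => intro v; simp [pvPairScan]
  | cons x xs ih =>
    intro v
    have h := ih x
    simp only [List.length_cons, List.range_succ_eq_map, List.filter_cons, List.filter_map,
      pvPairScan, List.getD_cons_zero, List.getD_cons_succ, Function.comp_def]
    by_cases hv : v = x - 1
    · rw [if_pos hv, if_neg (by simp [hv])]
      simpa using h
    · rw [if_neg hv, if_pos (by simpa using hv)]
      simp only [List.map_cons, List.getD_cons_zero]
      rw [Prod.ext_iff] at h ⊢
      simpa using h

-- pvAppendLast on a non-empty run list rewrites its last run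
theorem pv_appendLast_eq : ∀ (runs : List (List Int)) (h : runs ≠ []) (x : Int),
    pvAppendLast runs x = runs.dropLast ++ [runs.getLast h ++ [x]] := by
  intro runs
  induction runs with
  | nil => intro h; simp at h
  | cons r rs ih =>
    intro _ x
    cases rs with
    | nil => simp [pvAppendLast]
    | cons s ss =>
      show r :: pvAppendLast (s :: ss) x = _
      rw [ih (by simp) x]
      simp [List.getLast_cons, List.dropLast_cons_of_ne_nil]

-- last element of the last run (B's `runs[-1][-1]`)
def pvLL (runs : List (List Int)) : Int :=
  PySem.List.pyGetD (PySem.List.pyGetD runs (-1) []) (-1) 0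

-- B's grouping fold, read through starts / all-but-last ends, computes the same pair scan.
theorem pv_fold_runs : ∀ (xs : List Int) (runs : List (List Int))
    (_hne : runs ≠ []) (_hall : ∀ r ∈ runs, r ≠ []),
    ((xs.foldl
        (fun runs x =>
          if x == PySem.List.pyGetD (PySem.List.pyGetD runs (-1) []) (-1) 0 + 1 then
            pvAppendLast runs x
          else runs ++ [[x]]) runs).map (fun r => PySem.List.pyGetD r 0 0),
      (xs.foldl
        (fun runs x =>
          if x == PySem.List.pyGetD (PySem.List.pyGetD runs (-1) []) (-1) 0 + 1 then
            pvAppendLast runs x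
          else runs ++ [[x]]) runs).dropLast.map (fun r => PySem.List.pyGetD r (-1) 0))
    = (runs.map (fun r => PySem.List.pyGetD r 0 0) ++ (pvPairScan (pvLL runs) xs).1,
       runs.dropLast.map (fun r => PySem.List.pyGetD r (-1) 0) ++ (pvPairScan (pvLL runs) xs).2) := by
  intro xs
  induction xs with
  | nil => intro runs hne hall; simp [pvPairScan]
  | cons x xs ih =>
    intro runs hne hall
    simp only [List.foldl_cons]
    have hlast : runs.getLast hne ≠ [] := hall _ (List.getLast_mem hne)
    have hLL : pvLL runs = (runs.getLast hne).getLast hlast := by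
      simp [pvLL, PySem.List.pyGetD_neg_one runs [] hne, PySem.List.pyGetD_neg_one _ (0:Int) hlast]
    by_cases hc : x = pvLL runs + 1
    · -- consecutive: extend last run
      rw [if_pos (by simpa [pvLL] using hc)]
      rw [pv_appendLast_eq runs hne x] at *
      have hne' : runs.dropLast ++ [runs.getLast hne ++ [x]] ≠ [] := by simp
      have hall' : ∀ r ∈ runs.dropLast ++ [runs.getLast hne ++ [x]], r ≠ [] := by
        intro r hr
        rcases List.mem_append.mp hr with h1 | h1
        · exact hall _ (List.dropLast_subset _ h1)
        · simp at h1; subst h1; simp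
      rw [ih _ hne' hall']
      have hLL' : pvLL (runs.dropLast ++ [runs.getLast hne ++ [x]]) = x := by
        simp [pvLL, PySem.List.pyGetD_neg_one_append_singleton]
      rw [hLL']
      have hscan : pvPairScan (pvLL runs) (x :: xs) = pvPairScan x xs := by
        simp [pvPairScan, show pvLL runs = x - 1 by omega]
      rw [hscan]
      -- starts and dropLast-ends of the extended runs agree with those of runs
      have hstarts : (runs.dropLast ++ [runs.getLast hne ++ [x]]).map (fun r => PySem.List.pyGetD r 0 0)
          = runs.map (fun r => PySem.List.pyGetD r 0 0) := by
        conv_rhs => rw [← List.dropLast_append_getLast hne]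
        simp only [List.map_append, List.map_cons, List.map_nil]
        congr 2
        cases hh : runs.getLast hne with
        | nil => exact absurd hh hlast
        | cons a l => simp [PySem.List.pyGetD_zero_cons]
      have hends : (runs.dropLast ++ [runs.getLast hne ++ [x]]).dropLast = runs.dropLast := by
        simp
      rw [hstarts, hends]
    · -- jump: start a new run
      rw [if_neg (by simpa [pvLL] using hc)]
      have hne' : runs ++ [[x]] ≠ [] := by simp
      have hall' : ∀ r ∈ runs ++ [[x]], r ≠ [] := by
        intro r hr
        rcases List.mem_append.mp hr with h1 | h1
        · exact hall _ h1
        · simp at h1; subst h1; simp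
      rw [ih _ hne' hall']
      have hLL' : pvLL (runs ++ [[x]]) = x := by
        simp only [pvLL, PySem.List.pyGetD_neg_one_append_singleton]
        rw [show [x] = ([] : List Int) ++ [x] by simp, PySem.List.pyGetD_neg_one_append_singleton]
      rw [hLL']
      have hscan : pvPairScan (pvLL runs) (x :: xs) =
          (x :: (pvPairScan x xs).1, pvLL runs :: (pvPairScan x xs).2) := by
        simp [pvPairScan, show ¬ pvLL runs = x - 1 by omega]
      rw [hscan]
      have hends : (runs ++ [[x]]).dropLast.map (fun r => PySem.List.pyGetD r (-1) 0)
          = runs.dropLast.map (fun r => PySem.List.pyGetD r (-1) 0) ++ [pvLL runs] := by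
        simp only [List.dropLast_concat]
        conv_lhs => rw [← List.dropLast_append_getLast hne]
        simp [hLL, PySem.List.pyGetD_neg_one _ (0:Int) hlast]
      rw [hends]
      simp [PySem.List.pyGetD_zero_cons]

-- A's loop body, with the dead `i == len-1` branch, splits into two filter/map passes.
theorem pv_fold_split (c : Int) (g h : Int → Int) (p : Int → Prop) [DecidablePred p] :
    ∀ (l : List Int) (a b : List Int), (∀ i ∈ l, i ≠ c) →
      l.foldl (fun (s : List Int × List Int) i =>
          if i == c then (s.1, s.2 ++ [g i])
          else if decide (p i) then (s.1 ++ [g i], s.2 ++ [h i]) else s) (a, b)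
        = (a ++ (l.filter (fun i => decide (p i))).map g,
           b ++ (l.filter (fun i => decide (p i))).map h) := by
  intro l
  induction l with
  | nil => intro a b _; simp
  | cons x xs ih =>
    intro a b hne
    have hx : x ≠ c := hne x (List.mem_cons_self)
    have hxs : ∀ i ∈ xs, i ≠ c := fun i hi => hne i (List.mem_cons_of_mem _ hi)
    simp only [List.foldl_cons, List.filter_cons]
    rw [if_neg (by simpa using hx)]
    by_cases hp : p x
    · rw [if_pos (by simpa using hp)]
      simp only [hp, decide_true, ih _ _ hxs]
      simp
    · rw [if_neg (by simpa using hp)]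
      simp only [hp, decide_false, ih _ _ hxs]
      simp

-- the two ports agree on every non-empty vector
theorem pv_main (vec : List Int) (hpre : vec ≠ []) :
    detect_jumps_in_index_vector_simple vec = detect_jumps_in_index_vector_simple_alt vec := by
  obtain ⟨v, vs, rfl⟩ : ∃ v vs, vec = v :: vs := by
    cases vec with
    | nil => exact absurd rfl hpre
    | cons a l => exact ⟨a, l, rfl⟩
  -- B side reduces to the pair scan
  have hB : detect_jumps_in_index_vector_simple_alt (v :: vs)
      = (v :: (pvPairScan v vs).1, (pvPairScan v vs).2) := by
    unfold detect_jumps_in_index_vector_simple_alt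
    simp only [PySem.List.slice_from_one, PySem.List.slice_to_neg_one, List.tail_cons,
      PySem.List.pyGetD_zero_cons]
    rw [pv_fold_runs vs [[v]] (by simp) (by simp)]
    have hLLv : pvLL [[v]] = v := by
      simp only [pvLL]
      rw [show [[v]] = ([] : List (List Int)) ++ [[v]] by simp,
        PySem.List.pyGetD_neg_one_append_singleton,
        show [v] = ([] : List Int) ++ [v] by simp,
        PySem.List.pyGetD_neg_one_append_singleton]
    rw [hLLv]
    simp [PySem.List.pyGetD_zero_cons]
  rw [hB]
  -- A side reduces to the same pair scan
  unfold detect_jumps_in_index_vector_simple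
  by_cases hlen : 1 < (v :: vs).length
  · simp only [if_pos hlen]
    rw [pv_fold_split ((((v :: vs).length : Int)) - 1)
        (fun i => PySem.List.pyGetD (v :: vs) (i + 1) 0) (fun i => PySem.List.pyGetD (v :: vs) i 0)
        (fun i => PySem.List.pyGetD (v :: vs) i 0 ≠ PySem.List.pyGetD (v :: vs) (i + 1) 0 - 1)
        _ _ _ (by
          intro i hi
          have := (PySem.List.mem_pyRange_one.mp hi).2
          omega)]
    have hcast : (((v :: vs).length : Int)) - 1 = (vs.length : Int) := by
      simp only [List.length_cons]; push_cast; ring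
    rw [hcast, PySem.List.pyRange_one 0 (vs.length : Int)]
    have hcast1 : ∀ k : Nat, ((k : Int) + 1) = (((k + 1 : Nat)) : Int) := by
      intro k; push_cast; ring
    simp only [Int.sub_zero, Int.toNat_natCast, zero_add, List.filter_map, List.map_map,
      Function.comp_def, hcast1, PySem.List.pyGetD_natCast, PySem.List.pyGetD_zero_cons]
    have h := pv_scan_of_filter vs v
    rw [Prod.mk.injEq] at h ⊢
    refine ⟨?_, ?_⟩
    · rw [h.1]; simp
    · rw [h.2]; simp
  · have h1 : vs = [] := by simp at hlen; simpa using hlen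
    subst h1
    simp [pvPairScan]

-- ===== VERDICT (by name: the statement is the Claim_ definition above) =====
theorem detect_jumps_in_index_vector_simple_spec : Claim_equal_detect_jumps_in_index_vector_simple := by
  intro vec _ hpre
  unfold Spec_detect_jumps_in_index_vector_simple
  exact pv_main vec hpre
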